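-- pv_equiv track=rewrite | github.com/JJHH06/graphics-rasterizer | gl.py | allowedToPaint
-- ===== SOURCE A (Python) =====
-- def allowedToPaint(horizontal, lineColor):
--     count = 0
--     lineas = 0
--     while count < len(horizontal):
--         if horizontal[count] == lineColor:
--             lineas += 1
--             offset = 0
--             for n in horizontal[count:]:
--                 if n == lineColor:
--                     offset += 1
--                 else:
--                     break
--             count += offset
--
--
--         else:
--             count += 1
--     return lineas%2
-- ===== SOURCE B (Python) =====
-- def allowedToPaint(horizontal, lineColor):
--     runs = 0
--     prev_match = False
--     for x in horizontal:
--         cur = (x == lineColor)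
--         if cur and not prev_match:
--             runs += 1
--         prev_match = cur
--     return runs % 2
-- ===== Notes on version B (the rewrite author's own statement) =====
-- stated objective: faster
-- what changed: Replaced the quadratic while-loop that rescans each run's suffix with a single pass counting run starts via a previous-element-matched flag.
import Mathlib
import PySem

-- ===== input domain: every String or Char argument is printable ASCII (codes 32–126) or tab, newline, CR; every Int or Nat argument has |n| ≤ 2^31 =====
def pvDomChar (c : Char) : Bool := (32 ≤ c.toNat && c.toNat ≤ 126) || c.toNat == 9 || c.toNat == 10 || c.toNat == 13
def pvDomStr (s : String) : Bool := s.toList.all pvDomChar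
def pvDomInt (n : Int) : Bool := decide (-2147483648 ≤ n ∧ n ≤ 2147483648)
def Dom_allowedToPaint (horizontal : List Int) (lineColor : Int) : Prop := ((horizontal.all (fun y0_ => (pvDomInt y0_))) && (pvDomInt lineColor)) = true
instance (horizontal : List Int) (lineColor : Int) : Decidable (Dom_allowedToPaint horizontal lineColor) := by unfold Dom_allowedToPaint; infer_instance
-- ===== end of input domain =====

-- B replaces A's quadratic rescan of each run's suffix with one pass counting run starts.

-- ===== PORT A =====
-- inner 'for n in horizontal[count:]: if n == lineColor: offset += 1 else: break'
def pvRunOff (c : Int) : List Int → Nat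
  | [] => 0
  | x :: r => if x == c then pvRunOff c r + 1 else 0

-- the while-loop; 'count' is represented by the remaining suffix horizontal[count:]
def pvALoop (c : Int) : List Int → Int → Int
  | [], lineas => lineas
  | x :: r, lineas =>
    if x == c then
      -- count += offset, offset = pvRunOff c (x::r) = pvRunOff c r + 1 ≥ 1
      pvALoop c (r.drop (pvRunOff c r)) (lineas + 1)
    else
      pvALoop c r lineas
  termination_by l _ => l.length
  decreasing_by
    · simp only [List.length_drop, List.length_cons]; omega
    · simp

def allowedToPaint (horizontal : List Int) (lineColor : Int) : Int :=
  (pvALoop lineColor horizontal 0) % 2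

-- ===== PORT B =====
def pvBLoop (c : Int) : List Int → Bool → Int
  | [], _ => 0
  | x :: r, prev =>
    (if (x == c) && !prev then 1 else 0) + pvBLoop c r (x == c)

def allowedToPaint_alt (horizontal : List Int) (lineColor : Int) : Int :=
  (pvBLoop lineColor horizontal false) % 2

-- ===== PRECONDITION & SPEC =====
def Spec_allowedToPaint (horizontal : List Int) (lineColor : Int) (out : Int) : Prop := out = allowedToPaint_alt horizontal lineColor
instance (horizontal : List Int) (lineColor : Int) (out : Int) : Decidable (Spec_allowedToPaint horizontal lineColor out) := by unfold Spec_allowedToPaint; infer_instance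

-- ===== CLAIM (what is proved, stated in full; the proofs are below) =====
def Claim_equal_allowedToPaint : Prop := ∀ (horizontal : List Int) (lineColor : Int), Dom_allowedToPaint horizontal lineColor → Spec_allowedToPaint horizontal lineColor (allowedToPaint horizontal lineColor)

-- ===== LEMMAS AND PROOFS =====

-- after dropping the leading run of c's, the next element (if any) differs from c,
-- so the previous-matched flag no longer matters
theorem pvBLoop_drop (c : Int) (r : List Int) (b : Bool) :
    pvBLoop c (r.drop (pvRunOff c r)) b = pvBLoop c r true := by
  induction r generalizing b with
  | nil => simp [pvBLoop]
  | cons x r ih =>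
    by_cases h : x = c
    · simp [pvRunOff, pvBLoop, h, List.drop_succ_cons, ih]
    · simp [pvRunOff, pvBLoop, h]

theorem pvALoop_eq (c : Int) (l : List Int) (lineas : Int) :
    pvALoop c l lineas = lineas + pvBLoop c l false := by
  induction l, lineas using pvALoop.induct c with
  | case1 lineas => simp [pvALoop, pvBLoop]
  | case2 x r lineas h ih =>
    rw [pvALoop]
    simp only [h, if_pos]
    rw [ih, pvBLoop_drop]
    simp [pvBLoop, h]
    ring
  | case3 x r lineas h ih =>
    rw [pvALoop]
    simp only [h]
    rw [ih]
    simp [pvBLoop, h]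

-- ===== VERDICT (by name: the statement is the Claim_ definition above) =====
theorem allowedToPaint_spec : Claim_equal_allowedToPaint := by
  intro h c _
  unfold Spec_allowedToPaint allowedToPaint allowedToPaint_alt
  rw [pvALoop_eq]
  simp
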